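-- pv_equiv track=rewrite | github.com/NkAntony777/TCM-KGQA-RAG-AGENT-SYSTEM | backend/eval/runners/run_retrieval_eval.py | _is_hit
-- ===== SOURCE A (Python) =====
-- from typing import Any
--
-- def _is_hit(item: dict[str, Any], chunks: list[dict[str, Any]]) -> bool:
--     expected_ids = {str(value) for value in item.get("expected_any_chunk_ids", [])}
--     expected_files = {str(value) for value in item.get("expected_any_source_files", [])}
--
--     for chunk in chunks:
--         if not isinstance(chunk, dict):
--             continue
--         chunk_id = str(chunk.get("chunk_id", ""))
--         source_file = str(chunk.get("source_file") or chunk.get("filename") or "")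
--         if expected_ids and chunk_id in expected_ids:
--             return True
--         if expected_files and source_file in expected_files:
--             return True
--     return False
-- ===== SOURCE B (Python) =====
-- def _is_hit(item, chunks):
--     # Brute force: for each expected value, scan the chunks for a match.
--     dict_chunks = [chunk for chunk in chunks if isinstance(chunk, dict)]
--     for expected in item.get("expected_any_chunk_ids", []):
--         for chunk in dict_chunks:
--             if str(chunk.get("chunk_id", "")) == str(expected):
--                 return True
--     for expected in item.get("expected_any_source_files", []):
--         for chunk in dict_chunks:
--             if str(chunk.get("source_file") or chunk.get("filename") or "") == str(expected):
--                 return True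
--     return False
-- ===== Notes on version B (the rewrite author's own statement) =====
-- stated objective: alternative
-- what changed: Inverts the iteration: instead of one pass over chunks testing membership in precomputed expected sets, B loops over each expected value and scans the chunks for a direct string-equality match, using no sets at all.
import Mathlib
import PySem

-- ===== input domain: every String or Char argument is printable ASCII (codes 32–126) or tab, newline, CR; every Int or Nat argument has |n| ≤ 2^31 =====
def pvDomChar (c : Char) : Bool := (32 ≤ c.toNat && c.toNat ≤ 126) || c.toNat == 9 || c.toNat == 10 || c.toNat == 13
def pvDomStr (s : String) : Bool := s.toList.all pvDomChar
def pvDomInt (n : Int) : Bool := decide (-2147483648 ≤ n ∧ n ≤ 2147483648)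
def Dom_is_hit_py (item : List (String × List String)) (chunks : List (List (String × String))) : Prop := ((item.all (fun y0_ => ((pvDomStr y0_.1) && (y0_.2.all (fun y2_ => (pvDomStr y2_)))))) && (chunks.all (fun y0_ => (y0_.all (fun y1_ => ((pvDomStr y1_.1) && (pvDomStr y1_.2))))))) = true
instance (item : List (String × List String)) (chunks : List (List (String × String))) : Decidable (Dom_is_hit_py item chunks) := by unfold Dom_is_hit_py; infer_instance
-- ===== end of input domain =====

-- B inverts the iteration: instead of A's single pass over chunks testing membership in
-- precomputed expected sets, B loops over each expected value and scans the chunks for a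
-- direct string-equality match, using no sets at all; objective: alternative algorithm.

-- ===== PORT A =====
-- dict.get with first-match semantics on an association list (the type convention's dict)
def pvGet? {α : Type} (d : List (String × α)) (k : String) : Option α :=
  (d.find? (fun p => p.1 == k)).map (fun p => p.2)

def pvGetD {α : Type} (d : List (String × α)) (k : String) (dflt : α) : α :=
  (pvGet? d k).getD dflt

-- Python's `a or b` on strings (falsy = empty); a missing key (None) behaves exactly
-- like "" in the or-chain `chunk.get("source_file") or chunk.get("filename") or ""`,
-- so we read missing keys as "" — exact for the final string value.
def pvOrStr (a b : String) : String := if a = "" then b else a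

-- str(chunk.get("source_file") or chunk.get("filename") or "")
def pvChunkSrc (c : List (String × String)) : String :=
  pvOrStr ((pvGet? c "source_file").getD "") (pvOrStr ((pvGet? c "filename").getD "") "")

-- A's for-loop over chunks (the isinstance(chunk, dict) guard is vacuous under the
-- type convention: every chunk is a dict)
def isHitLoop (ids files : PySem.Set String) : List (List (String × String)) → Bool
  | [] => false
  | c :: rest =>
    let cid := pvGetD c "chunk_id" ""
    let sf := pvChunkSrc c
    if (!ids.isEmpty) && ids.contains cid then true
    else if (!files.isEmpty) && files.contains sf then true
    else isHitLoop ids files rest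

def is_hit_py (item : List (String × List String)) (chunks : List (List (String × String))) : Bool :=
  let expectedIds : PySem.Set String := PySem.Set.ofList (pvGetD item "expected_any_chunk_ids" [])
  let expectedFiles : PySem.Set String := PySem.Set.ofList (pvGetD item "expected_any_source_files" [])
  isHitLoop expectedIds expectedFiles chunks

-- ===== PORT B =====
-- B's first pair of nested loops with early return: for expected in ids, for chunk in chunks
def bIdScan (chunks : List (List (String × String))) : List String → Bool
  | [] => false
  | e :: rest =>
    if chunks.any (fun c => pvGetD c "chunk_id" "" == e) then true
    else bIdScan chunks rest

-- B's second pair of nested loops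
def bFileScan (chunks : List (List (String × String))) : List String → Bool
  | [] => false
  | e :: rest =>
    if chunks.any (fun c => pvChunkSrc c == e) then true
    else bFileScan chunks rest

def is_hit_py_alt (item : List (String × List String)) (chunks : List (List (String × String))) : Bool :=
  -- dict_chunks = chunks (every chunk is a dict under the type convention)
  let dictChunks := chunks
  if bIdScan dictChunks (pvGetD item "expected_any_chunk_ids" []) then true
  else bFileScan dictChunks (pvGetD item "expected_any_source_files" [])

-- ===== PRECONDITION & SPEC =====
def Spec_is_hit_py (item : List (String × List String)) (chunks : List (List (String × String))) (out : Bool) : Prop := out = is_hit_py_alt item chunks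
instance (item : List (String × List String)) (chunks : List (List (String × String))) (out : Bool) : Decidable (Spec_is_hit_py item chunks out) := by unfold Spec_is_hit_py; infer_instance

-- ===== CLAIM (what is proved, stated in full; the proofs are below) =====
def Claim_equal_is_hit_py : Prop := ∀ (item : List (String × List String)) (chunks : List (List (String × String))), Dom_is_hit_py item chunks → Spec_is_hit_py item chunks (is_hit_py item chunks)

-- ===== LEMMAS AND PROOFS =====

-- A's loop returns true iff some chunk's id is expected or some chunk's source is expected
theorem isHitLoop_eq_any (ids files : PySem.Set String) (cs : List (List (String × String))) :
    isHitLoop ids files cs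
      = cs.any (fun c => ids.contains (pvGetD c "chunk_id" "") || files.contains (pvChunkSrc c)) := by
  induction cs with
  | nil => rfl
  | cons c rest ih =>
    by_cases h1 : pvGetD c "chunk_id" "" ∈ ids
    · simp [isHitLoop, h1, List.ne_nil_of_mem h1]
    · by_cases h2 : pvChunkSrc c ∈ files
      · simp [isHitLoop, h1, h2, List.ne_nil_of_mem h2]
      · simp [isHitLoop, h1, h2, ih]

-- B's nested scan returns true iff some chunk's field value occurs among the expected values
theorem scan_eq_any (f : List (String × String) → String)
    (scan : List (List (String × String)) → List String → Bool)
    (hscan : ∀ chunks e rest, scan chunks (e :: rest)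
      = (if chunks.any (fun c => f c == e) then true else scan chunks rest))
    (hnil : ∀ chunks, scan chunks [] = false)
    (chunks : List (List (String × String))) (es : List String) :
    scan chunks es = chunks.any (fun c => (PySem.Set.ofList es).contains (f c)) := by
  induction es with
  | nil => simp [hnil, PySem.Set.ofList]
  | cons e rest ih =>
    rw [hscan, ih]
    by_cases h : chunks.any (fun c => f c == e) = true
    · rw [if_pos h]
      simp only [List.any_eq_true, beq_iff_eq] at h
      rcases h with ⟨c, hc, hfe⟩
      symm
      simp only [List.any_eq_true]
      refine ⟨c, hc, ?_⟩
      simp [PySem.Set.contains, List.contains_eq_mem, PySem.Set.mem_ofList, hfe]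
    · rw [if_neg h]
      simp only [List.any_eq_true, beq_iff_eq, not_exists, not_and] at h
      rw [Bool.eq_iff_iff]
      simp only [List.any_eq_true]
      constructor
      · rintro ⟨c, hc, hm⟩
        refine ⟨c, hc, ?_⟩
        simp only [PySem.Set.contains, List.contains_eq_mem, decide_eq_true_eq,
          PySem.Set.mem_ofList] at hm ⊢
        exact List.mem_cons_of_mem _ hm
      · rintro ⟨c, hc, hm⟩
        simp only [PySem.Set.contains, List.contains_eq_mem, decide_eq_true_eq,
          PySem.Set.mem_ofList, List.mem_cons] at hm
        rcases hm with h' | h'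
        · exact absurd h' (h c hc)
        · refine ⟨c, hc, ?_⟩
          simp [PySem.Set.contains, List.contains_eq_mem, PySem.Set.mem_ofList, h']

-- ===== VERDICT (by name: the statement is the Claim_ definition above) =====
theorem is_hit_py_spec : Claim_equal_is_hit_py := by
  intro item chunks _
  show is_hit_py item chunks = is_hit_py_alt item chunks
  simp only [is_hit_py, is_hit_py_alt]
  rw [isHitLoop_eq_any,
    scan_eq_any (fun c => pvGetD c "chunk_id" "") bIdScan (fun _ _ _ => rfl) (fun _ => rfl),
    scan_eq_any pvChunkSrc bFileScan (fun _ _ _ => rfl) (fun _ => rfl)]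
  by_cases hid : chunks.any (fun c => (PySem.Set.ofList (pvGetD item "expected_any_chunk_ids" [])).contains (pvGetD c "chunk_id" "")) = true
  · rw [if_pos hid]
    simp only [List.any_eq_true, Bool.or_eq_true] at hid ⊢
    rcases hid with ⟨c, hc, h⟩
    exact ⟨c, hc, Or.inl h⟩
  · rw [if_neg hid]
    simp only [List.any_eq_true, not_exists, not_and] at hid
    rw [Bool.eq_iff_iff]
    simp only [List.any_eq_true, Bool.or_eq_true]
    constructor
    · rintro ⟨c, hc, h | h⟩
      · exact absurd h (hid c hc)
      · exact ⟨c, hc, h⟩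
    · rintro ⟨c, hc, h⟩
      exact ⟨c, hc, Or.inr h⟩
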